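-- pv_equiv track=rewrite | github.com/quantumlib/Cirq | cirq/ops/basis.py | default_sorting_key
-- ===== SOURCE A (Python) =====
-- from typing import Any, Callable, Iterable, Tuple, Optional, TypeVar
--
-- def default_sorting_key(value: Any) -> str:
--     """A str method with hacks to support better lexicographic ordering.
--
--     These strings are not intended to be human readable.
--
--     The returned string will have digit-runs zero-padded up to at least 8
--     digits. That way, instead of 'a10' coming before 'a2', 'a000010' will come
--     after 'a000002'.
--
--     Also, the original length of each digit-run is appended after the
--     zero-padded run. This is so that 'a0' continues to come before 'a00'.
--     """
--
--     text = str(value)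
--
--     was_on_digits = False
--     last_transition = 0
--     chunks = []
--
--     def handle_transition_at(k):
--         chunk = text[last_transition:k]
--         if was_on_digits:
--             chunk = chunk.rjust(8, '0') + ':' + str(len(chunk))
--         chunks.append(chunk)
--
--     for i in range(len(text)):
--         on_digits = text[i].isdigit()
--         if was_on_digits != on_digits:
--             handle_transition_at(i)
--             was_on_digits = on_digits
--             last_transition = i
--
--     handle_transition_at(len(text))
--     return ''.join(chunks)
-- ===== SOURCE B (Python) =====
-- def default_sorting_key(value):
--     """Right-to-left scan building the output back-to-front: digits are
--     collected into a pending run; hitting a non-digit flushes the padded run."""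
--     text = str(value)
--     out = []   # output pieces, collected right-to-left
--     run = []   # pending digit run, collected right-to-left
--     for ch in reversed(text):
--         if ch.isdigit():
--             run.append(ch)
--         else:
--             if run:
--                 chunk = ''.join(reversed(run))
--                 out.append(chunk.rjust(8, '0') + ':' + str(len(chunk)))
--                 run = []
--             out.append(ch)
--     if run:
--         chunk = ''.join(reversed(run))
--         out.append(chunk.rjust(8, '0') + ':' + str(len(chunk)))
--     return ''.join(reversed(out))
-- ===== Notes on version B (the rewrite author's own statement) =====
-- stated objective: alternative
-- what changed: Replaces A's left-to-right scan that tracks a transition index and slices chunks out of the text by a right-to-left traversal that builds the output back-to-front, maintaining a pending digit-run accumulator that is flushed (padded) when a non-digit is reached.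
import Mathlib
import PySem

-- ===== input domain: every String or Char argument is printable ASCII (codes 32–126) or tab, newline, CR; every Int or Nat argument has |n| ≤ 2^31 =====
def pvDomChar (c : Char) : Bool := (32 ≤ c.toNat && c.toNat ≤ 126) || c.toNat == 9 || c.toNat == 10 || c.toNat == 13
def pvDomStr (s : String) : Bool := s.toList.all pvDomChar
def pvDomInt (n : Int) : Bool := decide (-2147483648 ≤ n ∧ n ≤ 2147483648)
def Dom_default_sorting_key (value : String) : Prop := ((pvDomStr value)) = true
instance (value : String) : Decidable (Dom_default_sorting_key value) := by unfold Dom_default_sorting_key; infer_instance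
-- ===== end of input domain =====

-- B replaces A's left-to-right transition-index scan by a right-to-left traversal building the output back-to-front with a pending digit-run accumulator; alternative decomposition, same cost.


-- ===== PORT A =====
-- handle_transition_at: chunk = text[last:k]; a digit run becomes chunk.rjust(8,'0') + ':' + str(len(chunk))
-- (rjust(8,'0') ported step for step as left-padding with '0' to width 8 — exact)
def pvAHandle (text : List Char) (was : Bool) (last : Int) (k : Int)
    (chunks : List (List Char)) : List (List Char) :=
  let chunk := PySem.List.slice text (some last) (some k)
  let chunk := if was then
      List.replicate (8 - chunk.length) '0' ++ chunk ++ (':' :: PySem.Int.toChars (chunk.length : Int))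
    else chunk
  chunks ++ [chunk]

-- the body of A's 'for i in range(len(text))' loop
def pvAStep (text : List Char) (st : Bool × Int × List (List Char)) (i : Int) :
    Bool × Int × List (List Char) :=
  let on := PySem.Chars.isdigit (PySem.List.pyGetD text i ' ')
  if st.1 != on then (on, i, pvAHandle text st.1 st.2.1 i st.2.2) else st

def default_sorting_key (value : String) : String :=
  let text := value.toList
  let st := (PySem.List.pyRange 0 (text.length : Int) 1).foldl (pvAStep text) (false, 0, [])
  String.ofList (PySem.Chars.join [] (pvAHandle text st.1 st.2.1 (text.length : Int) st.2.2))

-- ===== PORT B =====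
-- flush of the pending digit run (held right-to-left): chunk = reversed run, padded as in the task
def pvBFlush (run : List Char) : List Char :=
  let chunk := run.reverse
  List.replicate (8 - chunk.length) '0' ++ chunk ++ (':' :: PySem.Int.toChars (chunk.length : Int))

-- the body of B's 'for ch in reversed(text)' loop; state = (out pieces, pending run)
def pvBStep (st : List (List Char) × List Char) (ch : Char) :
    List (List Char) × List Char :=
  if PySem.Chars.isdigit ch then (st.1, st.2 ++ [ch])
  else
    let out := if st.2 = [] then st.1 else st.1 ++ [pvBFlush st.2]
    (out ++ [[ch]], [])

def default_sorting_key_alt (value : String) : String :=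
  let text := value.toList
  let st := (text.reverse).foldl pvBStep ([], [])
  let out := if st.2 = [] then st.1 else st.1 ++ [pvBFlush st.2]
  String.ofList (PySem.Chars.join [] out.reverse)

-- ===== PRECONDITION & SPEC =====
def Spec_default_sorting_key (value : String) (out : String) : Prop := out = default_sorting_key_alt value
instance (value : String) (out : String) : Decidable (Spec_default_sorting_key value out) := by unfold Spec_default_sorting_key; infer_instance

-- ===== CLAIM (what is proved, stated in full; the proofs are below) =====
def Claim_equal_default_sorting_key : Prop := ∀ (value : String), Dom_default_sorting_key value → Spec_default_sorting_key value (default_sorting_key value)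

-- ===== LEMMAS AND PROOFS =====

-- proof-side helper: what a finished run becomes in the output
def pvEmit (was : Bool) (chunk : List Char) : List Char :=
  if was then List.replicate (8 - chunk.length) '0' ++ chunk ++ (':' :: PySem.Int.toChars (chunk.length : Int))
  else chunk

-- proof-side reference: the output, run by run, left to right
def pvRuns : List Char → List Char
  | [] => []
  | c :: rest =>
    let d := PySem.Chars.isdigit c
    let run := c :: rest.takeWhile (fun x => PySem.Chars.isdigit x == d)
    let rest' := rest.dropWhile (fun x => PySem.Chars.isdigit x == d)
    pvEmit d run ++ pvRuns rest'
termination_by l => l.length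
decreasing_by
  simp only [List.length_cons]
  exact Nat.lt_succ_of_le (List.length_dropWhile_le _ _)

-- proof-side helper for the A side: the remaining output, given the pending run and the rest
def pvF (pending : List Char) (was : Bool) : List Char → List Char
  | [] => pvEmit was pending
  | c :: cs =>
    if PySem.Chars.isdigit c == was then pvF (pending ++ [c]) was cs
    else pvEmit was pending ++ pvF [c] (PySem.Chars.isdigit c) cs

theorem pvJoinNil (xs : List (List Char)) : PySem.Chars.join [] xs = xs.flatten := by
  induction xs with
  | nil => simp [PySem.Chars.join, List.intercalate]
  | cons x xs ih => cases xs with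
    | nil => simp [PySem.Chars.join, List.intercalate]
    | cons y ys => rw [PySem.Chars.join_cons_cons] at *; simp_all

theorem pvRuns_cons (c : Char) (cs : List Char) :
    pvRuns (c :: cs) =
      pvEmit (PySem.Chars.isdigit c)
          (c :: cs.takeWhile (fun x => PySem.Chars.isdigit x == PySem.Chars.isdigit c)) ++
        pvRuns (cs.dropWhile (fun x => PySem.Chars.isdigit x == PySem.Chars.isdigit c)) := by
  rw [pvRuns]

theorem pvF_eq_pvRuns (rest : List Char) : ∀ (pending : List Char) (was : Bool),
    pvF pending was rest =
      pvEmit was (pending ++ rest.takeWhile (fun x => PySem.Chars.isdigit x == was)) ++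
        pvRuns (rest.dropWhile (fun x => PySem.Chars.isdigit x == was)) := by
  induction rest with
  | nil => intro pending was; simp [pvF, pvRuns]
  | cons c cs ih =>
    intro pending was
    by_cases h : PySem.Chars.isdigit c = was
    · simp only [pvF, h, beq_self_eq_true, if_true, List.takeWhile_cons, List.dropWhile_cons]
      rw [ih (pending ++ [c]) was]
      simp
    · have h' : (PySem.Chars.isdigit c == was) = false := by simp [h]
      simp only [pvF, h', if_false, List.takeWhile_cons, List.dropWhile_cons, Bool.false_eq_true]
      rw [ih [c] (PySem.Chars.isdigit c), pvRuns_cons]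
      simp

theorem pvRuns_eq_pvF (text : List Char) : pvF [] false text = pvRuns text := by
  cases text with
  | nil => simp [pvF, pvRuns, pvEmit]
  | cons c cs =>
    by_cases h : PySem.Chars.isdigit c = false
    · rw [pvF_eq_pvRuns (c :: cs) [] false, pvRuns_cons]
      simp [pvEmit, h]
    · have h' : PySem.Chars.isdigit c = true := by revert h; cases PySem.Chars.isdigit c <;> simp
      rw [pvF_eq_pvRuns (c :: cs) [] false]
      simp [pvEmit, h']

-- A's fold from position p with state (was, last, chunks), followed by the final handle and
-- the join, equals the chunks already emitted followed by pvF on the pending run and the rest.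
theorem pvALoop_eq_pvF (text : List Char) :
    ∀ (n p last : Nat) (was : Bool) (chunks : List (List Char)),
    text.length - p ≤ n → last ≤ p → p ≤ text.length →
    PySem.Chars.join []
        (pvAHandle text
          ((PySem.List.pyRange (p : Int) (text.length : Int) 1).foldl (pvAStep text)
            (was, (last : Int), chunks)).1
          ((PySem.List.pyRange (p : Int) (text.length : Int) 1).foldl (pvAStep text)
            (was, (last : Int), chunks)).2.1
          (text.length : Int)
          ((PySem.List.pyRange (p : Int) (text.length : Int) 1).foldl (pvAStep text)
            (was, (last : Int), chunks)).2.2) =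
      PySem.Chars.join [] chunks ++ pvF ((text.drop last).take (p - last)) was (text.drop p) := by
  intro n
  induction n with
  | zero =>
    intro p last was chunks hn hlp hpl
    have hp : p = text.length := by omega
    subst hp
    rw [PySem.List.pyRange_one_eq_nil (by omega)]
    simp only [List.foldl_nil, pvAHandle, List.drop_length, pvF]
    rw [PySem.List.slice_natCast]
    simp [pvJoinNil, pvEmit]
  | succ n ih =>
    intro p last was chunks hn hlp hpl
    by_cases hpe : p = text.length
    · subst hpe
      rw [PySem.List.pyRange_one_eq_nil (by omega)]
      simp only [List.foldl_nil, pvAHandle, List.drop_length, pvF]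
      rw [PySem.List.slice_natCast]
      simp [pvJoinNil, pvEmit]
    · have hplt : p < text.length := by omega
      rw [PySem.List.pyRange_one_cons (by exact_mod_cast hplt)]
      simp only [List.foldl_cons]
      have hget : PySem.List.pyGetD text (p : Int) ' ' = text[p] := by
        rw [PySem.List.pyGetD_natCast]
        exact List.getD_eq_getElem _ _ hplt
      have hdrop : text.drop p = text[p] :: text.drop (p + 1) :=
        List.drop_eq_getElem_cons hplt
      have hcast : ((p : Int) + 1) = ((p + 1 : Nat) : Int) := by push_cast; ring
      by_cases hsame : was = PySem.Chars.isdigit text[p]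
      · have hstep : pvAStep text (was, (last : Int), chunks) (p : Int) =
            (was, (last : Int), chunks) := by
          simp [pvAStep, hget, ← hsame]
        rw [hstep, hcast, ih (p + 1) last was chunks (by omega) (by omega) (by omega)]
        congr 1
        rw [hdrop]
        simp only [pvF, ← hsame, beq_self_eq_true, if_true]
        congr 1
        have : (text.drop last).take (p + 1 - last) =
            (text.drop last).take (p - last) ++ [text[p]] := by
          rw [show p + 1 - last = (p - last) + 1 from by omega, List.take_add_one,
            List.getElem?_drop, show last + (p - last) = p from by omega,
            List.getElem?_eq_getElem hplt]
          rfl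
        rw [this]
      · have hstep : pvAStep text (was, (last : Int), chunks) (p : Int) =
            (PySem.Chars.isdigit text[p], (p : Int),
              pvAHandle text was (last : Int) (p : Int) chunks) := by
          have hne : (was != PySem.Chars.isdigit text[p]) = true := by
            revert hsame; cases was <;> cases PySem.Chars.isdigit text[p] <;> simp
          simp [pvAStep, hget, hne]
        rw [hstep, hcast,
          ih (p + 1) p (PySem.Chars.isdigit text[p]) _ (by omega) (by omega) (by omega)]
        rw [hdrop]
        have hF : pvF ((text.drop last).take (p - last)) was (text[p] :: text.drop (p + 1)) =
            pvEmit was ((text.drop last).take (p - last)) ++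
              pvF [text[p]] (PySem.Chars.isdigit text[p]) (text.drop (p + 1)) := by
          have : (PySem.Chars.isdigit text[p] == was) = false := by
            revert hsame; cases was <;> cases PySem.Chars.isdigit text[p] <;> simp
          simp [pvF, this]
        rw [hF]
        have hpend1 : (text[p] :: text.drop (p + 1)).take (p + 1 - p) = [text[p]] := by
          rw [show p + 1 - p = 1 from by omega]
          rfl
        rw [hpend1, pvAHandle, PySem.List.slice_natCast]
        simp [pvJoinNil, pvEmit, List.append_assoc]

-- pvRuns absorbs a leading non-digit char one at a time
theorem pvRuns_cons_nondigit (c : Char) (cs : List Char)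
    (h : PySem.Chars.isdigit c = false) : pvRuns (c :: cs) = c :: pvRuns cs := by
  rw [pvRuns_cons, h]
  cases cs with
  | nil => simp [pvEmit, pvRuns]
  | cons d t =>
    by_cases hd : PySem.Chars.isdigit d = false
    · rw [List.takeWhile_cons, List.dropWhile_cons]
      simp only [hd, beq_self_eq_true, if_true]
      rw [pvRuns_cons, hd]
      simp [pvEmit]
    · have hd' : PySem.Chars.isdigit d = true := by revert hd; cases PySem.Chars.isdigit d <;> simp
      rw [List.takeWhile_cons, List.dropWhile_cons]
      simp [pvEmit, hd']

-- pvRuns on a string starting with a digit: the whole digit prefix is one emitted run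
theorem pvRuns_digit_prefix (c : Char) (cs : List Char)
    (h : PySem.Chars.isdigit c = true) :
    pvRuns (c :: cs) =
      pvEmit true ((c :: cs).takeWhile PySem.Chars.isdigit) ++
        pvRuns ((c :: cs).dropWhile PySem.Chars.isdigit) := by
  have hp : (fun x => PySem.Chars.isdigit x == true) = fun x => PySem.Chars.isdigit x :=
    funext fun x => by cases PySem.Chars.isdigit x <;> simp
  rw [pvRuns_cons, h, List.takeWhile_cons, List.dropWhile_cons]
  simp only [h, if_true, hp]

-- B's fold (as a foldr, via foldl over the reverse): the pending run is the reversed digit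
-- prefix of the remaining text, and the pieces collected so far render the rest of the text.
theorem pvBInv (text : List Char) :
    (text.foldr (fun c st => pvBStep st c) ([], [])).2 =
        (text.takeWhile PySem.Chars.isdigit).reverse ∧
      (((text.foldr (fun c st => pvBStep st c) ([], [])).1).reverse).flatten =
        pvRuns (text.dropWhile PySem.Chars.isdigit) := by
  induction text with
  | nil => simp [pvRuns]
  | cons c cs ih =>
    obtain ⟨ih2, ih1⟩ := ih
    simp only [List.foldr_cons]
    by_cases hc : PySem.Chars.isdigit c = true
    · rw [pvBStep]
      simp only [hc, if_true, List.takeWhile_cons, List.dropWhile_cons]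
      exact ⟨by simp [ih2], by simpa [hc] using ih1⟩
    · have hc' : PySem.Chars.isdigit c = false := by
        revert hc; cases PySem.Chars.isdigit c <;> simp
      rw [pvBStep]
      simp only [hc', Bool.false_eq_true, if_false, List.takeWhile_cons, List.dropWhile_cons]
      refine ⟨by simp, ?_⟩
      by_cases hrun : (cs.foldr (fun c st => pvBStep st c) ([], [])).2 = []
      · have htw : cs.takeWhile PySem.Chars.isdigit = [] := by
          have := ih2; rw [hrun] at this
          exact (List.reverse_eq_nil_iff.mp this.symm)
        have hdw : cs.dropWhile PySem.Chars.isdigit = cs := by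
          cases cs with
          | nil => rfl
          | cons d t =>
            rw [List.takeWhile_cons] at htw
            by_cases hd : PySem.Chars.isdigit d = true
            · simp [hd] at htw
            · have hd' : PySem.Chars.isdigit d = false := by
                revert hd; cases PySem.Chars.isdigit d <;> simp
              rw [List.dropWhile_cons, hd']
              simp
        rw [if_pos hrun, List.reverse_append, List.flatten_append]
        simp only [List.reverse_cons, List.reverse_nil, List.nil_append, List.flatten_cons,
          List.flatten_nil, List.append_nil]
        rw [ih1, hdw, pvRuns_cons_nondigit c cs hc']
        rfl
      · rw [if_neg hrun, List.reverse_append, List.flatten_append, List.reverse_append,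
          List.flatten_append]
        simp only [List.reverse_cons, List.reverse_nil, List.nil_append, List.flatten_cons,
          List.flatten_nil, List.append_nil]
        have hne : cs.takeWhile PySem.Chars.isdigit ≠ [] := by
          intro h0
          rw [h0] at ih2; simp at ih2; exact hrun ih2
        obtain ⟨d, t, hdt⟩ : ∃ d t, cs = d :: t := by
          cases cs with
          | nil => simp at hne
          | cons d t => exact ⟨d, t, rfl⟩
        have hd : PySem.Chars.isdigit d = true := by
          by_contra hd
          have hd' : PySem.Chars.isdigit d = false := by
            revert hd; cases PySem.Chars.isdigit d <;> simp
          rw [hdt, List.takeWhile_cons, hd'] at hne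
          simp at hne
        have hflush : pvBFlush (cs.foldr (fun c st => pvBStep st c) ([], [])).2 =
            pvEmit true (cs.takeWhile PySem.Chars.isdigit) := by
          rw [ih2, pvBFlush, pvEmit]
          simp
        rw [pvRuns_cons_nondigit c cs hc', hdt, pvRuns_digit_prefix d t hd, ← hdt]
        rw [ih1, hflush]
        simp
-- ===== VERDICT (by name: the statement is the Claim_ definition above) =====
theorem default_sorting_key_spec : Claim_equal_default_sorting_key := by
  intro value _
  show default_sorting_key value = default_sorting_key_alt value
  unfold default_sorting_key default_sorting_key_alt
  refine congrArg String.ofList ?_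
  have hA := pvALoop_eq_pvF value.toList value.toList.length 0 0 false [] (by omega) (by omega)
    (by omega)
  simp only [Nat.cast_zero] at hA
  rw [hA]
  simp only [pvJoinNil, List.flatten_nil, List.nil_append, List.drop_zero, Nat.sub_zero,
    List.take_zero]
  rw [pvRuns_eq_pvF]
  -- B side
  rw [List.foldl_reverse]
  obtain ⟨h2, h1⟩ := pvBInv value.toList
  by_cases hrun : (value.toList.foldr (fun c st => pvBStep st c) ([], [])).2 = []
  · have htw : value.toList.takeWhile PySem.Chars.isdigit = [] := by
      have := h2; rw [hrun] at this
      exact (List.reverse_eq_nil_iff.mp this.symm)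
    have hdw : value.toList.dropWhile PySem.Chars.isdigit = value.toList := by
      cases hl : value.toList with
      | nil => rfl
      | cons d t =>
        rw [hl, List.takeWhile_cons] at htw
        by_cases hd : PySem.Chars.isdigit d = true
        · simp [hd] at htw
        · have hd' : PySem.Chars.isdigit d = false := by
            revert hd; cases PySem.Chars.isdigit d <;> simp
          rw [List.dropWhile_cons, hd']
          simp
    rw [if_pos hrun, h1, hdw]
  · rw [if_neg hrun, List.reverse_append, List.flatten_append]
    simp only [List.reverse_cons, List.reverse_nil, List.nil_append, List.flatten_cons,
      List.flatten_nil, List.append_nil]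
    have hne : value.toList.takeWhile PySem.Chars.isdigit ≠ [] := by
      intro h0
      rw [h0] at h2; simp at h2; exact hrun h2
    obtain ⟨d, t, hdt⟩ : ∃ d t, value.toList = d :: t := by
      cases hl : value.toList with
      | nil => rw [hl] at hne; simp at hne
      | cons d t => exact ⟨d, t, rfl⟩
    have hd : PySem.Chars.isdigit d = true := by
      by_contra hd
      have hd' : PySem.Chars.isdigit d = false := by
        revert hd; cases PySem.Chars.isdigit d <;> simp
      rw [hdt, List.takeWhile_cons, hd'] at hne
      simp at hne
    have hflush : pvBFlush (value.toList.foldr (fun c st => pvBStep st c) ([], [])).2 =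
        pvEmit true (value.toList.takeWhile PySem.Chars.isdigit) := by
      rw [h2, pvBFlush, pvEmit]
      simp
    rw [h1, hflush, hdt, pvRuns_digit_prefix d t hd, ← hdt]
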